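-- pv_equiv track=rewrite | github.com/cameronabrams/probedo | probedo/stringthings.py | ri_range
-- ===== SOURCE A (Python) =====
-- def split_ri(ri):
--     """A simple utility function for splitting the integer resid and
--     1-byte insertion code out of a string resid-insertion code
--     concatenation
--
--     Parameters
--     ----------
--     ri: the supposed resid-insertion concatenation
--
--     Returns
--     -------
--     tuple(int, str): the integer resid and the 1-byte insertion code or '' if none
--     """
--     if ri[-1].isdigit(): # there is no insertion code
--         r=int(ri)
--         i=''
--     else:
--         r=int(ri[:-1])
--         i=ri[-1]
--     return r,i
--
-- def ri_range(val,split_chars=['-','#']):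
--     the_split=[val]
--     for c in split_chars:
--         the_splits=[x.split(c) for x in the_split]
--         the_split=[]
--         for s in the_splits:
--             the_split.extend(s)
--     return [split_ri(x) for x in the_split]
-- ===== SOURCE B (Python) =====
-- def split_ri(ri):
--     if ri[-1].isdigit():
--         return int(ri), ''
--     return int(ri[:-1]), ri[-1]
--
-- def ri_range(val, split_chars=['-','#']):
--     # recursive tokenizer: split on the first separator, recurse into each piece
--     # with the remaining separators (depth-first), instead of A's pass-per-separator
--     # rebuild of the whole piece list
--     def fields(v, seps):
--         if not seps:
--             yield v
--         else:
--             for piece in v.split(seps[0]):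
--                 yield from fields(piece, seps[1:])
--     return [split_ri(x) for x in fields(val, split_chars)]
-- ===== Notes on version B (the rewrite author's own statement) =====
-- stated objective: simpler
-- what changed: B replaces A's pass-per-separator rebuild of the whole piece list (split every current piece on the separator, then flatten into a fresh list) by a depth-first recursion on the separator list that splits a piece on the first separator and recurses into each fragment with the rest, emitting tokens as a generator.
import Mathlib
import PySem

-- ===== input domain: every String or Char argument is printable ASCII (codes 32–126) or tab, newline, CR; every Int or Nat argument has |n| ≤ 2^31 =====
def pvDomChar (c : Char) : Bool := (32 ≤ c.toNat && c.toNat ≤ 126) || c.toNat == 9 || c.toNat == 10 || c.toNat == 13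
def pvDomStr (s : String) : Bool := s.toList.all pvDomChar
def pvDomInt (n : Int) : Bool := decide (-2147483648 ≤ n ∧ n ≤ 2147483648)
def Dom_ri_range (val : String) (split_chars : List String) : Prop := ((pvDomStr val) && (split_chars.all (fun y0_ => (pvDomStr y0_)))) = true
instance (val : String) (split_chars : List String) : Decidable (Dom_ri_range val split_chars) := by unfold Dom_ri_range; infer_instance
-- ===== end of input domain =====

-- B replaces A's pass-per-separator rebuild of the piece list by a depth-first recursion
-- on the separator list (objective: simpler).

-- ===== PORT A =====
-- shared helper: split_ri, returning none exactly where Python raises (IndexError/ValueError)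
def split_ri? (ri : String) : Option (Int × String) :=
  match PySem.Str.pyGet? ri (-1) with
  | none => none                                   -- ri[-1] IndexError on empty string
  | some c =>
    if PySem.Chars.isdigit c then
      (PySem.Int.ofStr? ri).map (fun r => (r, ""))
    else
      (PySem.Int.ofStr? (PySem.Str.slice ri none (some (-1)))).map
        (fun r => (r, String.ofList [c]))

-- x.split(c): PySem.Str.split? is none only for c = "" (Python raises ValueError there;
-- Pre_ excludes it), so getD never fires inside Pre_
def ri_range (val : String) (split_chars : List String) : List (Int × String) :=
  let the_split := split_chars.foldl
    (fun the_split c =>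
      let the_splits := the_split.map (fun x => (PySem.Str.split? x c).getD [x])
      the_splits.foldl (fun acc s => acc ++ s) [])
    [val]
  the_split.map (fun x => (split_ri? x).getD (0, ""))

-- ===== PORT B =====
-- B's generator fields(v, seps): structural recursion on the separator list
def ri_fields : String → List String → List String
  | v, [] => [v]
  | v, c :: rest => ((PySem.Str.split? v c).getD [v]).flatMap (fun p => ri_fields p rest)

def ri_range_alt (val : String) (split_chars : List String) : List (Int × String) :=
  (ri_fields val split_chars).map (fun x => (split_ri? x).getD (0, ""))

-- ===== PRECONDITION & SPEC =====
-- a field split_ri accepts: nonempty, and an int (optionally followed by one non-digit char)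
def pvPieceOK (t : List Char) : Bool :=
  match t.getLast? with
  | none => false
  | some c =>
    if PySem.Chars.isdigit c then (PySem.Int.ofChars? t).isSome
    else (PySem.Int.ofChars? t.dropLast).isSome

-- spec-level sequential splitting of val at the separators, used only to state Pre_
def pvFields : List (List Char) → List Char → List (List Char)
  | [], v => [v]
  | s :: rest, v => (PySem.Chars.splitOn v s).flatMap (pvFields rest)

-- Pre_ excludes exactly the inputs on which Python A raises: an empty separator string
-- (str.split('') is a ValueError) or a field that split_ri cannot parse (IndexError on an
-- empty field, ValueError from int()).
def Pre_ri_range (val : String) (split_chars : List String) : Prop :=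
  (split_chars.all (fun s => !s.toList.isEmpty)
    && (pvFields (split_chars.map String.toList) val.toList).all pvPieceOK) = true
instance (val : String) (split_chars : List String) : Decidable (Pre_ri_range val split_chars) := by
  unfold Pre_ri_range; infer_instance

def pvWitness_ri_range : String × List String := ("12-3A#45", ["-", "#"])

def Spec_ri_range (val : String) (split_chars : List String) (out : List (Int × String)) : Prop := out = ri_range_alt val split_chars
instance (val : String) (split_chars : List String) (out : List (Int × String)) : Decidable (Spec_ri_range val split_chars out) := by unfold Spec_ri_range; infer_instance

-- ===== CLAIM (what is proved, stated in full; the proofs are below) =====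
def Claim_equal_ri_range : Prop := ∀ (val : String) (split_chars : List String), Dom_ri_range val split_chars → Pre_ri_range val split_chars → Spec_ri_range val split_chars (ri_range val split_chars)

-- ===== LEMMAS AND PROOFS =====

-- A's outer loop over the separators, started from any piece list L, produces exactly
-- the depth-first token list of B's recursion applied to each piece of L
lemma A_loop (sc : List String) :
    ∀ L : List String,
    sc.foldl
      (fun the_split c =>
        let the_splits := the_split.map (fun x => (PySem.Str.split? x c).getD [x])
        the_splits.foldl (fun acc s => acc ++ s) [])
      L
    = L.flatMap (fun v => ri_fields v sc) := by
  induction sc with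
  | nil => intro L; simp [ri_fields]
  | cons c rest ih =>
    intro L
    rw [List.foldl_cons]
    have hpass :
        (let the_splits := L.map (fun x => (PySem.Str.split? x c).getD [x])
         the_splits.foldl (fun acc s => acc ++ s) [])
        = L.flatMap (fun x => (PySem.Str.split? x c).getD [x]) := by
      show List.foldl (fun acc s => acc ++ s) []
          (L.map (fun x => (PySem.Str.split? x c).getD [x])) = _
      rw [PySem.List.foldl_append_eq_flatMap (fun s => s)]
      simp [List.flatMap_def, Function.comp_def]
    rw [hpass, ih, List.flatMap_assoc]
    simp [ri_fields]

-- ===== VERDICT (by name: the statement is the Claim_ definition above) =====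
theorem ri_range_spec : Claim_equal_ri_range := by
  intro val sc _ _
  show ri_range val sc = ri_range_alt val sc
  unfold ri_range ri_range_alt
  rw [A_loop sc [val]]
  simp
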